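-- pv_equiv track=rewrite | github.com/pirl-unc/mhcgnomes | mhcgnomes/tokenize.py | split_and_extract_attributes
-- ===== SOURCE A (Python) =====
-- def split_and_extract_attributes(s):
--     parts = s.split()
--     if "=" not in s:
--         return parts, {}
--
--     parts_before_attributes = []
--     attributes = {}
--     found_first_attribute = False
--     attribute_key_in_progress = None
--     attribute_values_in_progress = None
--     for part in parts:
--         if part.count("=") == 1:
--             found_first_attribute = True
--             if attribute_key_in_progress:
--                 attributes[attribute_key_in_progress] = " ".join(attribute_values_in_progress)
--             attribute_key_in_progress, first_value = part.split("=")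
--             attribute_values_in_progress = [first_value]
--         elif not found_first_attribute:
--             parts_before_attributes.append(part)
--         else:
--             attribute_values_in_progress.append(part)
--     if attribute_key_in_progress:
--         attributes[attribute_key_in_progress] = " ".join(attribute_values_in_progress)
--     return parts_before_attributes, attributes
-- ===== SOURCE B (Python) =====
-- def split_and_extract_attributes(s):
--     parts = s.split()
--     if "=" not in s:
--         return parts, {}
--     idx = next((i for i, p in enumerate(parts) if p.count("=") == 1), None)
--     if idx is None:
--         return parts, {}
--     groups = []
--     for part in parts[idx:]:
--         if part.count("=") == 1:
--             key, value = part.split("=")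
--             groups.append((key, [value]))
--         else:
--             groups[-1][1].append(part)
--     attributes = {}
--     for key, values in groups:
--         if key:
--             attributes[key] = " ".join(values)
--     return parts[:idx], attributes
-- ===== Notes on version B (the rewrite author's own statement) =====
-- stated objective: alternative
-- what changed: Replaces A's single-pass state machine with five mutable variables (found flag, key-in-progress, values-in-progress, flush-before-and-after) by a two-phase decomposition: locate the index of the first key=value token, slice off the prefix, build an explicit list of (key, value-list) groups over the suffix, then fold the groups into the dict (skipping empty keys, later keys overwriting).
import Mathlib
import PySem

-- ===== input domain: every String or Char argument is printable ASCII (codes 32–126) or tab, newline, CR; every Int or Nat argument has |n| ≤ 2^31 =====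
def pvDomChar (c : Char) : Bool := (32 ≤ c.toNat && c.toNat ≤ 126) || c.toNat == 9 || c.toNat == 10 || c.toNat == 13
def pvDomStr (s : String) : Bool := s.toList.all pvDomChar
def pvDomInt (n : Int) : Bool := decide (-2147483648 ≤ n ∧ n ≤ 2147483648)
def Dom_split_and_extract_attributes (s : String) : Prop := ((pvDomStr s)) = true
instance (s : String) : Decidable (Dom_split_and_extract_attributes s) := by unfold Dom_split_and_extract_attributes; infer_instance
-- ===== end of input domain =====

-- B replaces A's single-pass five-variable state machine by a two-phase decomposition:
-- locate the first 'key=value' token, slice the prefix, build explicit (key, values) groups,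
-- then fold the groups into the dict (objective: alternative; same return value).

-- shared primitive ports: part.count("=") == 1, and the two halves of part.split("=")
def pvCEq (p : String) : Bool := PySem.Str.count p "=" == 1
def pvKeyOf (p : String) : String := ((PySem.Str.split? p "=").getD []).getD 0 ""
def pvValOf (p : String) : String := ((PySem.Str.split? p "=").getD []).getD 1 ""

-- ===== PORT A =====
-- the 'if attribute_key_in_progress:' flush (None and "" are both falsy)
def pvFlushA (attrs : PySem.Dict String String) (key? : Option String) (vals : List String) :
    PySem.Dict String String :=
  match key? with
  | some k => if k ≠ "" then attrs.insert k (PySem.Str.join " " vals) else attrs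
  | none => attrs

-- one iteration of A's for-loop; state = (parts_before, attributes, found, key_in_progress, values_in_progress)
def pvStepA (st : List String × PySem.Dict String String × Bool × Option String × List String)
    (p : String) : List String × PySem.Dict String String × Bool × Option String × List String :=
  let (pb, attrs, found, key?, vals) := st
  if pvCEq p then (pb, pvFlushA attrs key? vals, true, some (pvKeyOf p), [pvValOf p])
  else if !found then (pb ++ [p], attrs, found, key?, vals)
  else (pb, attrs, found, key?, vals ++ [p])

def split_and_extract_attributes (s : String) : List String × (List (String × String)) :=
  let parts := PySem.Str.split₀ s
  if !PySem.Str.isIn "=" s then (parts, (PySem.Dict.empty : PySem.Dict String String).items)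
  else
    let st := parts.foldl pvStepA ([], PySem.Dict.empty, false, none, [])
    (st.1, (pvFlushA st.2.1 st.2.2.2.1 st.2.2.2.2).items)

-- ===== PORT B =====
-- B's group-building loop: a '=' token opens a new group, any other token joins the last group
def pvStepB (gs : List (String × List String)) (p : String) : List (String × List String) :=
  if pvCEq p then gs ++ [(pvKeyOf p, [pvValOf p])]
  else gs.dropLast ++ [((gs.getLast?.getD ("", [])).1, (gs.getLast?.getD ("", [])).2 ++ [p])]

-- B's dict-building loop: empty keys are skipped, later keys overwrite in place
def pvInsStep (d : PySem.Dict String String) (g : String × List String) : PySem.Dict String String :=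
  if g.1 ≠ "" then d.insert g.1 (PySem.Str.join " " g.2) else d

def split_and_extract_attributes_alt (s : String) : List String × (List (String × String)) :=
  let parts := PySem.Str.split₀ s
  if !PySem.Str.isIn "=" s then (parts, [])
  else
    match parts.findIdx? pvCEq with
    | none => (parts, [])
    | some i =>
      let groups := (parts.drop i).foldl pvStepB []
      let attrs := groups.foldl pvInsStep (PySem.Dict.empty : PySem.Dict String String)
      (parts.take i, attrs.items)

-- ===== PRECONDITION & SPEC =====
def Spec_split_and_extract_attributes (s : String) (out : List String × (List (String × String))) : Prop := out = split_and_extract_attributes_alt s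
instance (s : String) (out : List String × (List (String × String))) : Decidable (Spec_split_and_extract_attributes s out) := by unfold Spec_split_and_extract_attributes; infer_instance

-- ===== CLAIM (what is proved, stated in full; the proofs are below) =====
def Claim_equal_split_and_extract_attributes : Prop := ∀ (s : String), Dom_split_and_extract_attributes s → Spec_split_and_extract_attributes s (split_and_extract_attributes s)

-- ===== LEMMAS AND PROOFS =====

-- A's loop over a prefix of non-attribute tokens only accumulates parts_before
theorem foldA_prefix (l : List String) (pb : List String) (d : PySem.Dict String String)
    (k? : Option String) (vs : List String) (h : ∀ p ∈ l, pvCEq p = false) :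
    l.foldl pvStepA (pb, d, false, k?, vs) = (pb ++ l, d, false, k?, vs) := by
  induction l generalizing pb with
  | nil => simp
  | cons p l ih =>
    have hp : pvCEq p = false := h p (List.mem_cons_self)
    simp only [List.foldl_cons]
    rw [show pvStepA (pb, d, false, k?, vs) p = (pb ++ [p], d, false, k?, vs) from by
      simp [pvStepA, hp]]
    rw [ih (pb ++ [p]) (fun q hq => h q (List.mem_cons_of_mem _ hq))]
    simp

-- B's group loop never touches groups other than the last: a closed prefix passes through
theorem foldB_shift (l : List String) (gs0 gs : List (String × List String)) (h : gs ≠ []) :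
    l.foldl pvStepB (gs0 ++ gs) = gs0 ++ l.foldl pvStepB gs := by
  induction l generalizing gs with
  | nil => simp
  | cons p l ih =>
    simp only [List.foldl_cons]
    by_cases hp : pvCEq p
    · rw [show pvStepB (gs0 ++ gs) p = gs0 ++ (gs ++ [(pvKeyOf p, [pvValOf p])]) from by
        simp [pvStepB, hp]]
      rw [show pvStepB gs p = gs ++ [(pvKeyOf p, [pvValOf p])] from by simp [pvStepB, hp]]
      exact ih (gs ++ [(pvKeyOf p, [pvValOf p])]) (by simp)
    · rw [Bool.not_eq_true] at hp
      rw [show pvStepB (gs0 ++ gs) p = gs0 ++ pvStepB gs p from by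
        simp only [pvStepB, hp, Bool.false_eq_true, if_false]
        rw [List.dropLast_append_of_ne_nil h, List.getLast?_append_of_ne_nil _ h,
          List.append_assoc]]
      exact ih (pvStepB gs p) (by simp [pvStepB, hp])

-- main invariant: after the first attribute token, A's flushed result is B's group fold
theorem foldA_main (l : List String) (pb : List String) (d : PySem.Dict String String)
    (k : String) (vs : List String) :
    ((l.foldl pvStepA (pb, d, true, some k, vs)).1,
      pvFlushA (l.foldl pvStepA (pb, d, true, some k, vs)).2.1
        (l.foldl pvStepA (pb, d, true, some k, vs)).2.2.2.1
        (l.foldl pvStepA (pb, d, true, some k, vs)).2.2.2.2)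
    = (pb, (l.foldl pvStepB [(k, vs)]).foldl pvInsStep d) := by
  induction l generalizing d k vs with
  | nil => simp [pvFlushA, pvInsStep]
  | cons p l ih =>
    simp only [List.foldl_cons]
    by_cases hp : pvCEq p
    · rw [show pvStepA (pb, d, true, some k, vs) p
          = (pb, pvFlushA d (some k) vs, true, some (pvKeyOf p), [pvValOf p]) from by
        simp [pvStepA, hp]]
      rw [show pvStepB [(k, vs)] p = [(k, vs)] ++ [(pvKeyOf p, [pvValOf p])] from by
        simp [pvStepB, hp]]
      rw [foldB_shift l [(k, vs)] [(pvKeyOf p, [pvValOf p])] (by simp),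
        ih (pvFlushA d (some k) vs) (pvKeyOf p) [pvValOf p]]
      simp [pvFlushA, pvInsStep]
    · rw [Bool.not_eq_true] at hp
      rw [show pvStepA (pb, d, true, some k, vs) p = (pb, d, true, some k, vs ++ [p]) from by
        simp [pvStepA, hp]]
      rw [show pvStepB [(k, vs)] p = [(k, vs ++ [p])] from by simp [pvStepB, hp]]
      exact ih d k (vs ++ [p])

-- the empty dict's item list is empty
theorem empty_items : (PySem.Dict.empty : PySem.Dict String String).items = [] := rfl

-- ===== VERDICT (by name: the statement is the Claim_ definition above) =====
theorem split_and_extract_attributes_spec : Claim_equal_split_and_extract_attributes := by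
  intro s _
  unfold Spec_split_and_extract_attributes split_and_extract_attributes split_and_extract_attributes_alt
  by_cases hin : PySem.Str.isIn "=" s
  · simp only [hin, Bool.not_true, Bool.false_eq_true, if_false]
    set parts := PySem.Str.split₀ s with hparts
    cases hidx : parts.findIdx? pvCEq with
    | none =>
      have hall : ∀ p ∈ parts, pvCEq p = false := List.findIdx?_eq_none_iff.mp hidx
      rw [foldA_prefix parts [] PySem.Dict.empty none [] hall]
      simp [pvFlushA, empty_items]
    | some i =>
      obtain ⟨hi, hpi, hbefore⟩ := List.findIdx?_eq_some_iff_getElem.mp hidx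
      have htake : ∀ p ∈ parts.take i, pvCEq p = false := by
        intro p hp
        obtain ⟨j, hj, rfl⟩ := List.getElem_of_mem hp
        have hjlt : j < i := lt_of_lt_of_le hj (by simp [List.length_take])
        rw [List.getElem_take]
        simpa using hbefore j hjlt
      have hsplit : parts = parts.take i ++ parts[i] :: parts.drop (i + 1) := by
        rw [List.getElem_cons_drop, List.take_append_drop]
      conv_lhs => rw [hsplit]
      rw [List.foldl_append, foldA_prefix (parts.take i) [] PySem.Dict.empty none [] htake,
        List.foldl_cons]
      rw [show pvStepA (([] : List String) ++ parts.take i, PySem.Dict.empty, false, none, [])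
            parts[i]
          = (parts.take i, PySem.Dict.empty, true, some (pvKeyOf parts[i]), [pvValOf parts[i]])
          from by simp [pvStepA, hpi, pvFlushA]]
      have hm := foldA_main (parts.drop (i + 1)) (parts.take i) PySem.Dict.empty
        (pvKeyOf parts[i]) [pvValOf parts[i]]
      have h1 : (List.foldl pvStepA (parts.take i, PySem.Dict.empty, true,
          some (pvKeyOf parts[i]), [pvValOf parts[i]]) (parts.drop (i + 1))).1
          = parts.take i := by
        have := congrArg Prod.fst hm; simpa using this
      have h2 : pvFlushA (List.foldl pvStepA (parts.take i, PySem.Dict.empty, true,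
            some (pvKeyOf parts[i]), [pvValOf parts[i]]) (parts.drop (i + 1))).2.1
          (List.foldl pvStepA (parts.take i, PySem.Dict.empty, true,
            some (pvKeyOf parts[i]), [pvValOf parts[i]]) (parts.drop (i + 1))).2.2.2.1
          (List.foldl pvStepA (parts.take i, PySem.Dict.empty, true,
            some (pvKeyOf parts[i]), [pvValOf parts[i]]) (parts.drop (i + 1))).2.2.2.2
          = ((parts.drop (i + 1)).foldl pvStepB
              [(pvKeyOf parts[i], [pvValOf parts[i]])]).foldl pvInsStep PySem.Dict.empty := by
        have := congrArg Prod.snd hm; simpa using this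
      rw [h1, h2]
      show _ = (parts.take i,
        (((parts.drop i).foldl pvStepB []).foldl pvInsStep PySem.Dict.empty).items)
      have hdrop : parts.drop i = parts[i] :: parts.drop (i + 1) := (List.getElem_cons_drop hi).symm
      rw [hdrop, List.foldl_cons,
        show pvStepB [] parts[i] = [(pvKeyOf parts[i], [pvValOf parts[i]])] from by
          simp [pvStepB, hpi]]
  · rw [Bool.not_eq_true] at hin
    simp only [hin, Bool.not_false, if_true]
    rw [empty_items]
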